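-- pv_equiv track=rewrite | github.com/luomi16/AI-algorithm-solutions | burntPancake.py | bfs_pancake
-- ===== SOURCE A (Python) =====
-- from collections import deque
--
-- def flip(s, i):
--     flipped = ""
--     for j in range(0, 2*i, 2):
--         number = s[j]
--         color = 'w' if s[j+1] == 'b' else 'b'
--         flipped = number + color + flipped
--     return flipped + s[2*i:]
--
-- def bfs_pancake(start):
--     goal = start.replace("b", "w")
--     visited = set()
--     queue = deque([(start, [])])
--
--     while queue:
--         state, path = queue.popleft()
--
--         if state == goal:
--             return path + [state]
--
--         for i in range(1, len(start) // 2 + 1):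
--             new_state = flip(state, i)
--             if new_state not in visited:
--                 visited.add(new_state)
--                 new_path = path + [state[:2*i] + "|" + state[2*i:]]
--                 queue.append((new_state, new_path))
--
--     return []
-- ===== SOURCE B (Python) =====
-- from collections import deque
--
-- def _flip(s, i):
--     out = []
--     for j in range(0, 2 * i, 2):
--         out.append(s[j] + ('w' if s[j + 1] == 'b' else 'b'))
--     return ''.join(reversed(out)) + s[2 * i:]
--
-- def bfs_pancake(start):
--     goal = start.replace("b", "w")
--     visited = set()
--     queue = deque([start])
--     came_from = {}
--
--     while queue:
--         state = queue.popleft()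
--
--         if state == goal:
--             path = [state]
--             cur = state
--             while cur != start:
--                 parent, i = came_from[cur]
--                 path.insert(0, parent[:2 * i] + "|" + parent[2 * i:])
--                 cur = parent
--             return path
--
--         for i in range(1, len(start) // 2 + 1):
--             new_state = _flip(state, i)
--             if new_state not in visited:
--                 visited.add(new_state)
--                 came_from[new_state] = (state, i)
--                 queue.append(new_state)
--
--     return []
-- ===== Notes on version B (the rewrite author's own statement) =====
-- stated objective: alternative
-- what changed: BFS keeps only states in the queue plus a came_from parent map (state -> (parent, flip index)) and reconstructs the flip path backwards from the goal, instead of copying the whole annotated path into every queue entry.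
import Mathlib
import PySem

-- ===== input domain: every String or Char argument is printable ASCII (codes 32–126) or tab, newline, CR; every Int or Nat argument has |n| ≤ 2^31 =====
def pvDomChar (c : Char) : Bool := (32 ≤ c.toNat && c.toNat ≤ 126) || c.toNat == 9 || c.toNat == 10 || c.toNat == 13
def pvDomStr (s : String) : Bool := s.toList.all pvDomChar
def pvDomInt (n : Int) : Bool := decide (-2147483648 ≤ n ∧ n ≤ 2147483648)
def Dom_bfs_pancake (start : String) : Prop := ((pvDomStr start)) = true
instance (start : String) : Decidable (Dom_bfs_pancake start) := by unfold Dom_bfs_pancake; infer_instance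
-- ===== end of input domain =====

-- B replaces A's path-copying BFS queue by a states-only queue with a came_from parent map and
-- backward path reconstruction (alternative decomposition; same return value).
-- Both ports carry Python's set/dict as Std.HashSet/Std.HashMap (only membership, lookup and size
-- are used, never iteration order). A's deque is ported as a plain FIFO list (pop = head, append
-- = ++ [x]); B's deque as a two-list queue; both are exact renderings of deque's behaviour.

-- ===== PORT A =====
-- state[:2*i] + "|" + state[2*i:]  (occurs in A's loop and in B's reconstruction)
def pvAnn (s : List Char) (i : Nat) : List Char := s.take (2*i) ++ '|' :: s.drop (2*i)

-- A's flip: builds `flipped` by prepending number+toggled-color pairs, then appends s[2*i:]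
def pvFlipA (s : List Char) (i : Nat) : List Char :=
  ((List.range i).foldl
      (fun acc k => s.getD (2*k) ' ' :: (if s.getD (2*k+1) ' ' = 'b' then 'w' else 'b') :: acc) [])
    ++ s.drop (2*i)

-- A's while loop; fuel makes the recursion total (fuel is never exhausted in the lockstep proof:
-- both loops receive the same fuel and are shown to agree step for step)
def pvLoopA (start goal : List Char) :
    Nat → List (List Char × List (List Char)) → Std.HashSet (List Char) → List (List Char)
  | 0, _, _ => []
  | fuel+1, q, visited =>
    match q with
    | [] => []
    | (state, path) :: rest =>
      if state = goal then path ++ [state]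
      else
        let res := (List.range' 1 (start.length / 2)).foldl
          (fun (acc : List (List Char × List (List Char)) × Std.HashSet (List Char)) i =>
            let ns := pvFlipA state i
            if acc.2.contains ns then acc
            else (acc.1 ++ [(ns, path ++ [pvAnn state i])], acc.2.insert ns))
          (rest, visited)
        pvLoopA start goal fuel res.1 res.2

def bfs_pancake (start : String) : List String :=
  let cs := start.toList
  let goal := (PySem.Str.replace start "b" "w").toList
  (pvLoopA cs goal (128 ^ cs.length + 2) [(cs, [])] ∅).map String.ofList

-- ===== PORT B =====
-- B's deque via two lists: popleft from `front` (refilled from `back` when dry), append = cons to `back`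
def pvPop {α : Type} (front back : List α) : Option (α × List α × List α) :=
  match front with
  | x :: f => some (x, f, back)
  | [] =>
    match back.reverse with
    | x :: f => some (x, f, [])
    | [] => none

-- B's flip: collects the pairs left-to-right, then joins them reversed
def pvFlipB (s : List Char) (i : Nat) : List Char :=
  (((List.range i).map
      (fun k => [s.getD (2*k) ' ', if s.getD (2*k+1) ' ' = 'b' then 'w' else 'b'])).reverse).flatten
    ++ s.drop (2*i)

-- B's backward reconstruction (`while cur != start`); fuel d.size+1 is proved sufficient below
def pvRecon (start : List Char) (d : Std.HashMap (List Char) (List Char × Nat)) :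
    Nat → List Char → List (List Char) → List (List Char)
  | 0, _, acc => acc
  | fuel+1, cur, acc =>
    if cur = start then acc
    else
      match d[cur]? with
      | some (par, i) => pvRecon start d fuel par (pvAnn par i :: acc)
      | none => acc

-- B's inner `for i in range(1, len(start)//2 + 1)` loop, as structural recursion on the index list
def pvExpand (state : List Char) :
    List Nat → List (List Char) → Std.HashSet (List Char) →
    Std.HashMap (List Char) (List Char × Nat) →
    List (List Char) × Std.HashSet (List Char) × Std.HashMap (List Char) (List Char × Nat)
  | [], back, visited, came_from => (back, visited, came_from)
  | i :: is, back, visited, came_from =>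
    let ns := pvFlipB state i
    if visited.contains ns then pvExpand state is back visited came_from
    else pvExpand state is (ns :: back) (visited.insert ns) (came_from.insert ns (state, i))

def pvLoopB (start goal : List Char) :
    Nat → List (List Char) → List (List Char) → Std.HashSet (List Char) →
    Std.HashMap (List Char) (List Char × Nat) → List (List Char)
  | 0, _, _, _, _ => []
  | fuel+1, front, back, visited, came_from =>
    match pvPop front back with
    | none => []
    | some (state, front', back') =>
      if state = goal then pvRecon start came_from (came_from.size + 1) state [state]
      else
        let res := pvExpand state (List.range' 1 (start.length / 2)) back' visited came_from
        pvLoopB start goal fuel front' res.1 res.2.1 res.2.2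

def bfs_pancake_alt (start : String) : List String :=
  let cs := start.toList
  let goal := (PySem.Str.replace start "b" "w").toList
  (pvLoopB cs goal (128 ^ cs.length + 2) [cs] [] ∅ ∅).map String.ofList

-- ===== PRECONDITION & SPEC =====
def Spec_bfs_pancake (start : String) (out : List String) : Prop := out = bfs_pancake_alt start
instance (start : String) (out : List String) : Decidable (Spec_bfs_pancake start out) := by unfold Spec_bfs_pancake; infer_instance

-- ===== CLAIM (what is proved, stated in full; the proofs are below) =====
def Claim_equal_bfs_pancake : Prop := ∀ (start : String), Dom_bfs_pancake start → Spec_bfs_pancake start (bfs_pancake start)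

-- ===== LEMMAS AND PROOFS =====

lemma pvFlip_aux (s : List Char) : ∀ (l : List Nat) (acc : List Char),
    l.foldl (fun acc k => s.getD (2*k) ' ' :: (if s.getD (2*k+1) ' ' = 'b' then 'w' else 'b') :: acc) acc
      = (((l.map (fun k => [s.getD (2*k) ' ', if s.getD (2*k+1) ' ' = 'b' then 'w' else 'b'])).reverse).flatten) ++ acc := by
  intro l
  induction l with
  | nil => intro acc; simp
  | cons x xs ih =>
    intro acc
    simp only [List.foldl_cons, List.map_cons, List.reverse_cons, List.flatten_append,
      List.flatten_cons, List.flatten_nil, List.append_nil, List.append_assoc]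
    rw [ih]
    simp

lemma pvFlip_eq (s : List Char) (i : Nat) : pvFlipB s i = pvFlipA s i := by
  unfold pvFlipA pvFlipB
  rw [pvFlip_aux]
  simp

lemma pvPop_none {α : Type} {front back : List α} (h : front ++ back.reverse = []) :
    pvPop front back = none := by
  rcases List.append_eq_nil_iff.mp h with ⟨h1, h2⟩
  subst h1
  simp [pvPop, h2]

lemma pvPop_rep {α : Type} {front back : List α} {x : α} {l : List α}
    (h : front ++ back.reverse = x :: l) :
    ∃ f' b', pvPop front back = some (x, f', b') ∧ f' ++ b'.reverse = l := by
  cases front with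
  | cons y f =>
    simp only [List.cons_append, List.cons.injEq] at h
    obtain ⟨rfl, rfl⟩ := h
    exact ⟨f, back, rfl, rfl⟩
  | nil =>
    simp only [List.nil_append] at h
    refine ⟨l, [], ?_, by simp⟩
    simp [pvPop, h]

-- came_from chains: `pvChain start d s p` = walking back from s through d reaches start,
-- reading off exactly the annotated path p (in forward order)
inductive pvChain (start : List Char) (d : Std.HashMap (List Char) (List Char × Nat)) :
    List Char → List (List Char) → Prop
  | base : pvChain start d start []
  | step {s par : List Char} {i : Nat} {p : List (List Char)} :
      s ≠ start → d[s]? = some (par, i) → pvChain start d par p →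
      pvChain start d s (p ++ [pvAnn par i])

abbrev pvExt (d d' : Std.HashMap (List Char) (List Char × Nat)) : Prop :=
  ∀ (k : List Char) (v : List Char × Nat), d[k]? = some v → d'[k]? = some v

abbrev pvKeysVis (d : Std.HashMap (List Char) (List Char × Nat)) (vis : Std.HashSet (List Char)) : Prop :=
  ∀ (k : List Char), d[k]?.isSome → k ∈ vis

lemma pvChain_mono {start : List Char} {d d' : Std.HashMap (List Char) (List Char × Nat)}
    {s : List Char} {p : List (List Char)} (hext : pvExt d d')
    (h : pvChain start d s p) : pvChain start d' s p := by
  induction h with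
  | base => exact pvChain.base
  | step hne hget _ ih => exact pvChain.step hne (hext _ _ hget) ih

lemma pvChain_det {start : List Char} {d : Std.HashMap (List Char) (List Char × Nat)}
    {s : List Char} {p q : List (List Char)}
    (hp : pvChain start d s p) (hq : pvChain start d s q) : p = q := by
  induction hp generalizing q with
  | base =>
    cases hq with
    | base => rfl
    | step hne hget hc => exact absurd rfl hne
  | step hne hget hc ih =>
    cases hq with
    | base => exact absurd rfl hne
    | step hne' hget' hc' =>
      rw [hget] at hget'
      injection hget' with h12
      injection h12 with h1 h2
      subst h1; subst h2
      rw [ih hc']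

lemma pvChain_keys {start : List Char} {d : Std.HashMap (List Char) (List Char × Nat)}
    {s : List Char} {p : List (List Char)} (h : pvChain start d s p) :
    ∃ ks : List (List Char), ks.Nodup ∧ ks.length = p.length ∧
      ∀ k ∈ ks, d[k]?.isSome ∧ ∃ q, pvChain start d k q ∧ q.length ≤ p.length := by
  induction h with
  | base => exact ⟨[], by simp⟩
  | @step s par i p hne hget hc ih =>
    obtain ⟨ks, hnd, hlen, hall⟩ := ih
    have hsn : s ∉ ks := by
      intro hmem
      obtain ⟨-, q, hq, hql⟩ := hall s hmem
      have := pvChain_det hq (pvChain.step hne hget hc)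
      subst this
      simp at hql
    refine ⟨s :: ks, List.nodup_cons.mpr ⟨hsn, hnd⟩, by simp [hlen], ?_⟩
    intro k hk
    rcases List.mem_cons.mp hk with rfl | hk
    · exact ⟨by simp [hget], p ++ [pvAnn par i], pvChain.step hne hget hc, le_refl _⟩
    · obtain ⟨h1, q, hq, hql⟩ := hall k hk
      exact ⟨h1, q, hq, by simp; omega⟩

lemma pvChain_size {start : List Char} {d : Std.HashMap (List Char) (List Char × Nat)}
    {s : List Char} {p : List (List Char)} (h : pvChain start d s p) : p.length ≤ d.size := by
  obtain ⟨ks, hnd, hlen, hall⟩ := pvChain_keys h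
  have hsub : ks ⊆ d.keys := by
    intro k hk
    exact Std.HashMap.mem_keys.mpr (Std.HashMap.isSome_getElem?_iff_mem.mp (hall k hk).1)
  have hkeys : d.keys.Nodup := by
    refine Std.HashMap.distinct_keys.imp ?_
    intro a b hab he
    rw [he] at hab
    simp at hab
  have := (List.Nodup.subperm hnd hsub).length_le
  have hk : d.keys.length = d.size := Std.HashMap.length_keys
  omega

lemma pvChain_recon {start : List Char} {d : Std.HashMap (List Char) (List Char × Nat)}
    {s : List Char} {p : List (List Char)} (h : pvChain start d s p) :
    ∀ (fuel : Nat) (acc : List (List Char)), p.length ≤ fuel →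
      pvRecon start d fuel s acc = p ++ acc := by
  induction h with
  | base =>
    intro fuel acc _
    cases fuel with
    | zero => rfl
    | succ f => simp [pvRecon]
  | @step s par i p hne hget hc ih =>
    intro fuel acc hf
    cases fuel with
    | zero => simp at hf
    | succ f =>
      simp only [pvRecon, if_neg hne, hget]
      rw [ih _ _ (by simp at hf; omega)]
      simp

-- A's expansion foldl and B's pvExpand, in lockstep: the no-op case (every flip already visited)
lemma pvFold_noop (state : List Char) (path : List (List Char)) :
    ∀ (is : List Nat) (qA : List (List Char × List (List Char))) (bB : List (List Char))
      (vis : Std.HashSet (List Char)) (d : Std.HashMap (List Char) (List Char × Nat)),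
      (∀ i ∈ is, pvFlipA state i ∈ vis) →
      (is.foldl
        (fun (acc : List (List Char × List (List Char)) × Std.HashSet (List Char)) i =>
          let ns := pvFlipA state i
          if acc.2.contains ns then acc
          else (acc.1 ++ [(ns, path ++ [pvAnn state i])], acc.2.insert ns))
        (qA, vis) = (qA, vis)) ∧
      (pvExpand state is bB vis d = (bB, vis, d)) := by
  intro is
  induction is with
  | nil => intro qA bB vis d _; exact ⟨rfl, rfl⟩
  | cons i is ih =>
    intro qA bB vis d hall
    have hi : vis.contains (pvFlipA state i) = true :=
      Std.HashSet.mem_iff_contains.mp (hall i List.mem_cons_self)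
    have hi' : vis.contains (pvFlipB state i) = true := by rw [pvFlip_eq]; exact hi
    simp only [List.foldl_cons, pvExpand, hi, hi', if_true]
    exact ih qA bB vis d (fun j hj => hall j (List.mem_cons_of_mem _ hj))

-- the general lockstep lemma for one expansion: A appends annotated pairs at the queue tail,
-- B conses bare states onto `back` and records them in came_from
lemma pvFold_rel (start state : List Char) (p : List (List Char)) :
    ∀ (is : List Nat) (qA : List (List Char × List (List Char))) (f' bB : List (List Char))
      (vis : Std.HashSet (List Char)) (d : Std.HashMap (List Char) (List Char × Nat)),
      qA.map Prod.fst = f' ++ bB.reverse →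
      pvKeysVis d vis →
      (∀ e ∈ qA, pvChain start d e.1 e.2 ∨ e.1 = start) →
      pvChain start d state p →
      let rA := is.foldl
        (fun (acc : List (List Char × List (List Char)) × Std.HashSet (List Char)) i =>
          let ns := pvFlipA state i
          if acc.2.contains ns then acc
          else (acc.1 ++ [(ns, p ++ [pvAnn state i])], acc.2.insert ns))
        (qA, vis)
      let rB := pvExpand state is bB vis d
      rA.1.map Prod.fst = f' ++ rB.1.reverse ∧ rB.2.1 = rA.2 ∧ pvKeysVis rB.2.2 rA.2 ∧
        (∀ e ∈ rA.1, pvChain start rB.2.2 e.1 e.2 ∨ e.1 = start) ∧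
        (∀ x ∈ vis, x ∈ rA.2) ∧ (∀ i ∈ is, pvFlipA state i ∈ rA.2) ∧ pvExt d rB.2.2 := by
  intro is
  induction is with
  | nil =>
    intro qA f' bB vis d h1 h2 h3 h4
    exact ⟨h1, rfl, h2, h3, fun x hx => hx, by simp, fun k v hk => hk⟩
  | cons i is ih =>
    intro qA f' bB vis d h1 h2 h3 h4
    rw [List.foldl_cons]
    by_cases hmem : pvFlipA state i ∈ vis
    · have hc1 : vis.contains (pvFlipA state i) = true := Std.HashSet.mem_iff_contains.mp hmem
      have sA : (let ns := pvFlipA state i;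
          if (qA, vis).2.contains ns then (qA, vis)
          else ((qA, vis).1 ++ [(ns, p ++ [pvAnn state i])], (qA, vis).2.insert ns))
          = (qA, vis) := by
        simp [hc1]
      have sB : pvExpand state (i :: is) bB vis d = pvExpand state is bB vis d := by
        simp [pvExpand, pvFlip_eq, hc1]
      rw [sA, sB]
      obtain ⟨e1, e2, e3, e4, e5, e6, e7⟩ := ih qA f' bB vis d h1 h2 h3 h4
      refine ⟨e1, e2, e3, e4, e5, ?_, e7⟩
      intro j hj
      rcases List.mem_cons.mp hj with rfl | hj
      · exact e5 _ hmem
      · exact e6 j hj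
    · have hc1 : vis.contains (pvFlipA state i) = false := by
        rw [← Bool.not_eq_true, ← Std.HashSet.mem_iff_contains]
        exact hmem
      have sA : (let ns := pvFlipA state i;
          if (qA, vis).2.contains ns then (qA, vis)
          else ((qA, vis).1 ++ [(ns, p ++ [pvAnn state i])], (qA, vis).2.insert ns))
          = (qA ++ [(pvFlipA state i, p ++ [pvAnn state i])], vis.insert (pvFlipA state i)) := by
        simp [hc1]
      have sB : pvExpand state (i :: is) bB vis d
          = pvExpand state is (pvFlipA state i :: bB) (vis.insert (pvFlipA state i))
              (d.insert (pvFlipA state i) (state, i)) := by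
        simp [pvExpand, pvFlip_eq, hc1]
      rw [sA, sB]
      have hnone : d[pvFlipA state i]? = none := by
        cases hg : d[pvFlipA state i]? with
        | none => rfl
        | some v => exact absurd (h2 _ (by simp [hg])) hmem
      have hext : pvExt d (d.insert (pvFlipA state i) (state, i)) := by
        intro k v hk
        have hne : (pvFlipA state i == k) = false := by
          rw [beq_eq_false_iff_ne]
          intro h
          rw [← h, hnone] at hk
          exact Option.some_ne_none v hk.symm
        rw [Std.HashMap.getElem?_insert, hne, if_neg (by simp)]
        exact hk
      have h1' : (qA ++ [(pvFlipA state i, p ++ [pvAnn state i])]).map Prod.fst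
          = f' ++ (pvFlipA state i :: bB).reverse := by
        simp [h1]
      have h2' : pvKeysVis (d.insert (pvFlipA state i) (state, i))
          (vis.insert (pvFlipA state i)) := by
        intro k hk
        rw [Std.HashSet.mem_insert]
        by_cases hke : (pvFlipA state i == k) = true
        · exact Or.inl hke
        · rw [Std.HashMap.getElem?_insert, if_neg hke] at hk
          exact Or.inr (h2 k hk)
      have h3' : ∀ e ∈ qA ++ [(pvFlipA state i, p ++ [pvAnn state i])],
          pvChain start (d.insert (pvFlipA state i) (state, i)) e.1 e.2 ∨ e.1 = start := by
        intro e he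
        rcases List.mem_append.mp he with he | he
        · exact (h3 e he).imp (pvChain_mono hext) id
        · rw [List.mem_singleton] at he
          subst he
          by_cases hes : pvFlipA state i = start
          · exact Or.inr hes
          · refine Or.inl (pvChain.step hes ?_ (pvChain_mono hext h4))
            rw [Std.HashMap.getElem?_insert, if_pos (by simp)]
      have h4' : pvChain start (d.insert (pvFlipA state i) (state, i)) state p :=
        pvChain_mono hext h4
      obtain ⟨e1, e2, e3, e4, e5, e6, e7⟩ := ih _ _ _ _ _ h1' h2' h3' h4'
      refine ⟨e1, e2, e3, e4, ?_, ?_, fun k v hk => e7 k v (hext k v hk)⟩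
      · intro x hx
        exact e5 x (by rw [Std.HashSet.mem_insert]; exact Or.inr hx)
      · intro j hj
        rcases List.mem_cons.mp hj with rfl | hj
        · exact e5 _ (by rw [Std.HashSet.mem_insert]; exact Or.inl (by simp))
        · exact e6 j hj

-- the main lockstep simulation of the two while loops
lemma pvLoop_eq (start goal : List Char) :
    ∀ (fuel : Nat) (qA : List (List Char × List (List Char))) (fB bB : List (List Char))
      (vis : Std.HashSet (List Char)) (d : Std.HashMap (List Char) (List Char × Nat)),
      qA.map Prod.fst = fB ++ bB.reverse →
      pvKeysVis d vis →
      (∀ e ∈ qA, pvChain start d e.1 e.2 ∨ e.1 = start) →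
      ((qA = [(start, [])] ∧ fB = [start] ∧ bB = []) ∨
        ((∀ i ∈ List.range' 1 (start.length / 2), pvFlipA start i ∈ vis) ∧ start ≠ goal)) →
      pvLoopA start goal fuel qA vis = pvLoopB start goal fuel fB bB vis d := by
  intro fuel
  induction fuel with
  | zero =>
    intro qA fB bB vis d h1 hkv h3 hg
    rfl
  | succ fuel ih =>
    intro qA fB bB vis d h1 hkv h3 hg
    simp only [pvLoopA, pvLoopB]
    cases qA with
    | nil =>
      rw [pvPop_none h1.symm]
    | cons hd rest =>
      obtain ⟨state, path⟩ := hd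
      have h1' : fB ++ bB.reverse = state :: rest.map Prod.fst := by
        rw [← h1]; rfl
      obtain ⟨f', b', hpop, hrep⟩ := pvPop_rep h1'
      rw [hpop]
      have hent : pvChain start d state path ∨ state = start :=
        h3 (state, path) List.mem_cons_self
      have hrest : ∀ e ∈ rest, pvChain start d e.1 e.2 ∨ e.1 = start :=
        fun e he => h3 e (List.mem_cons_of_mem _ he)
      by_cases hgoal : state = goal
      · simp only [if_pos hgoal]
        rcases hg with ⟨hqi, -, -⟩ | ⟨hExp, hneq⟩
        · -- initial state: the queue is exactly [(start, [])]
          injection hqi with h01 h02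
          injection h01 with hs hp
          subst hp
          rw [hs]
          simp [pvRecon]
        · have hc : pvChain start d state path := by
            rcases hent with hc | hs
            · exact hc
            · exact absurd (hs ▸ hgoal) hneq
          rw [pvChain_recon hc (d.size + 1) [state]
            (le_trans (pvChain_size hc) (Nat.le_succ _))]
      · simp only [if_neg hgoal]
        rcases hg with ⟨hqi, hfi, hbi⟩ | ⟨hExp, hneq⟩
        · -- initial step: state = start, path = [], rest = []
          injection hqi with h01 h02
          injection h01 with hs hp
          subst h02; subst hp; subst hfi; subst hbi
          have hpop0 : pvPop [start] ([] : List (List Char)) = some (start, [], []) := rfl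
          rw [hpop0] at hpop
          injection hpop with hpop
          injection hpop with hx hrest'
          injection hrest' with hf hb
          subst hf; subst hb
          have hneq' : start ≠ goal := hs ▸ hgoal
          have hc : pvChain start d state [] := hs ▸ pvChain.base
          obtain ⟨e1, e2, e3, e4, e5, e6, e7⟩ :=
            pvFold_rel start state [] (List.range' 1 (start.length / 2)) [] [] [] vis d
              (by simp) hkv (by intro e he; simp at he) hc
          dsimp only at e1 e2 e3 e4 ⊢
          rw [e2]
          exact ih _ _ _ _ _ e1 e3 e4 (Or.inr ⟨fun i hi => hs ▸ e6 i hi, hneq'⟩)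
        · rcases hent with hc | hs
          · obtain ⟨e1, e2, e3, e4, e5, e6, e7⟩ :=
              pvFold_rel start state path (List.range' 1 (start.length / 2)) rest f' b'
                vis d hrep.symm hkv hrest hc
            dsimp only at e1 e2 e3 e4 ⊢
            rw [e2]
            exact ih _ _ _ _ _ e1 e3 e4 (Or.inr ⟨fun i hi => e5 _ (hExp i hi), hneq⟩)
          · obtain ⟨nA, nB⟩ :=
              pvFold_noop state path (List.range' 1 (start.length / 2)) rest b' vis d
                (fun i hi => (show state = start from hs) ▸ hExp i hi)
            dsimp only at nA nB ⊢
            rw [nA, nB]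
            exact ih _ _ _ _ _ hrep.symm hkv hrest (Or.inr ⟨hExp, hneq⟩)

-- ===== VERDICT (by name: the statement is the Claim_ definition above) =====
theorem bfs_pancake_spec : Claim_equal_bfs_pancake := by
  intro start _
  unfold Spec_bfs_pancake bfs_pancake bfs_pancake_alt
  dsimp only
  congr 1
  exact pvLoop_eq start.toList ((PySem.Str.replace start "b" "w").toList)
    (128 ^ start.toList.length + 2) [(start.toList, [])] [start.toList] []
    (∅ : Std.HashSet (List Char)) (∅ : Std.HashMap (List Char) (List Char × Nat))
    (by simp)
    (fun k hk => by simp at hk)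
    (fun e he => by rw [List.mem_singleton] at he; subst he; exact Or.inr rfl)
    (Or.inl ⟨rfl, rfl, rfl⟩)
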